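-- pv_equiv track=rewrite | github.com/SungMoY/CSE101 | CSE 101/hw/101-homework-1-starter-files(1)/to submit/bill.py | bill
-- ===== SOURCE A (Python) =====
-- def bill (orders):
--     A_Price = 2
--     B_Price = 2
--     C_Price = 2
--     current_sales_total = 0
--     for i in orders:
--         if i == 'A':
--             if A_Price == 6:
--                 A_Price = 2
--                 current_sales_total += A_Price
--                 A_Price += 1
--             else:
--                 current_sales_total += A_Price
--                 A_Price += 1
--         elif i == 'B':
--             if B_Price == 6:
--                 B_Price = 2
--                 current_sales_total += B_Price
--                 B_Price += 1
--             else: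
--                 current_sales_total += B_Price
--                 B_Price += 1
--         else:
--             if C_Price == 6:
--                 C_Price = 2
--                 current_sales_total += C_Price
--                 C_Price += 1
--             else:
--                 current_sales_total += C_Price
--                 C_Price += 1
--     return current_sales_total
-- ===== SOURCE B (Python) =====
-- def _group_total(n):
--     # cyclic prices 2,3,4,5 sum to 14 per full cycle of 4 orders
--     q, r = n // 4, n % 4
--     return q * 14 + (0 if r == 0 else 2 if r == 1 else 5 if r == 2 else 9)
--
-- def bill(orders):
--     a = orders.count('A')
--     b = orders.count('B')
--     c = len(orders) - a - b
--     return _group_total(a) + _group_total(b) + _group_total(c)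
-- ===== Notes on version B (the rewrite author's own statement) =====
-- stated objective: simpler
-- what changed: Replaces the stateful price-cycling loop by counting the three buckets (A, B, other) and applying a closed-form cyclic-price sum q*14 + [0,2,5,9][r] per bucket.
import Mathlib
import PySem

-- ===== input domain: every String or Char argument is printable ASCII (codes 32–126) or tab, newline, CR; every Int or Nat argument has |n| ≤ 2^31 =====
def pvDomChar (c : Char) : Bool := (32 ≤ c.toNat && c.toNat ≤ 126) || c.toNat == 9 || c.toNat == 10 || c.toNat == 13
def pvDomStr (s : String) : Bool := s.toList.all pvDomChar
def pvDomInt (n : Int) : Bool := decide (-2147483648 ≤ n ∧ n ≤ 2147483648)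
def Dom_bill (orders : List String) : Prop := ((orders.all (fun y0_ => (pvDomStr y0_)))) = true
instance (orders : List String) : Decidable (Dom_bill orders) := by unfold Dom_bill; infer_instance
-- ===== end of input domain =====

-- B replaces A's stateful price-cycling loop by bucket counts with a closed-form cyclic price sum (simpler).


-- ===== PORT A =====
-- state: (A_Price, B_Price, C_Price, current_sales_total)
def billStep (s : Int × Int × Int × Int) (i : String) : Int × Int × Int × Int :=
  let (ap, bp, cp, t) := s
  if i = "A" then
    if ap = 6 then (2 + 1, bp, cp, t + 2) else (ap + 1, bp, cp, t + ap)
  else if i = "B" then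
    if bp = 6 then (ap, 2 + 1, cp, t + 2) else (ap, bp + 1, cp, t + bp)
  else
    if cp = 6 then (ap, bp, 2 + 1, t + 2) else (ap, bp, cp + 1, t + cp)

def bill (orders : List String) : Int :=
  (orders.foldl billStep (2, 2, 2, 0)).2.2.2

-- ===== PORT B =====
def groupTotal (n : Int) : Int :=
  let q := PySem.Int.floordiv n 4
  let r := PySem.Int.mod n 4
  q * 14 + (if r = 0 then 0 else if r = 1 then 2 else if r = 2 then 5 else 9)

def bill_alt (orders : List String) : Int :=
  let a : Int := (PySem.List.count orders "A" : Int)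
  let b : Int := (PySem.List.count orders "B" : Int)
  let c : Int := (orders.length : Int) - a - b
  groupTotal a + groupTotal b + groupTotal c

-- ===== PRECONDITION & SPEC =====
def Spec_bill (orders : List String) (out : Int) : Prop := out = bill_alt orders
instance (orders : List String) (out : Int) : Decidable (Spec_bill orders out) := by unfold Spec_bill; infer_instance

-- ===== CLAIM (what is proved, stated in full; the proofs are below) =====
def Claim_equal_bill : Prop := ∀ (orders : List String), Dom_bill orders → Spec_bill orders (bill orders)

-- ===== LEMMAS AND PROOFS =====

-- price of the next order in a bucket that has already served n orders
def pN (n : Nat) : Int := if n % 4 = 0 ∧ n ≠ 0 then 6 else 2 + (n % 4 : Int)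

-- closed-form total for a bucket of n orders (Nat version of groupTotal)
def S (n : Nat) : Int :=
  ((n / 4 : Nat) : Int) * 14 +
    (if n % 4 = 0 then 0 else if n % 4 = 1 then 2 else if n % 4 = 2 then 5 else 9)

def countOther (l : List String) : Nat :=
  (l.filter (fun s => ¬ s = "A" ∧ ¬ s = "B")).length

theorem pN_step (n : Nat) : (if pN n = 6 then (2 : Int) + 1 else pN n + 1) = pN (n + 1) := by
  unfold pN; split_ifs <;> omega

theorem add_step (n : Nat) : (if pN n = 6 then (2 : Int) else pN n) = S (n + 1) - S n := by
  unfold pN S; split_ifs <;> omega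

theorem groupTotal_natCast (n : Nat) : groupTotal (n : Int) = S n := by
  simp only [groupTotal, S]
  rw [show (4 : Int) = ((4 : Nat) : Int) from by norm_num,
    PySem.Int.floordiv_natCast, PySem.Int.mod_natCast]
  split_ifs <;> omega

theorem billStep_pN (na nb nc : Nat) (t : Int) (i : String) :
    billStep (pN na, pN nb, pN nc, t) i =
      if i = "A" then (pN (na + 1), pN nb, pN nc, t + (S (na + 1) - S na))
      else if i = "B" then (pN na, pN (nb + 1), pN nc, t + (S (nb + 1) - S nb))
      else (pN na, pN nb, pN (nc + 1), t + (S (nc + 1) - S nc)) := by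
  unfold billStep
  by_cases hA : i = "A" <;> by_cases hB : i = "B" <;>
    simp [hA, hB, ← pN_step, ← add_step] <;> split_ifs <;> simp_all

theorem bill_fold (l : List String) : ∀ (na nb nc : Nat) (t : Int),
    (l.foldl billStep (pN na, pN nb, pN nc, t)).2.2.2 =
      t + (S (na + l.count "A") - S na) + (S (nb + l.count "B") - S nb)
        + (S (nc + countOther l) - S nc) := by
  induction l with
  | nil => intro na nb nc t; simp [countOther]
  | cons i l ih =>
    intro na nb nc t
    rw [List.foldl_cons, billStep_pN]
    by_cases hA : i = "A"
    · have hc : (i :: l).count "A" = l.count "A" + 1 := by simp [hA]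
      have hc2 : (i :: l).count "B" = l.count "B" := by simp [hA]
      have hc3 : countOther (i :: l) = countOther l := by simp [countOther, hA]
      rw [if_pos hA, ih, hc, hc2, hc3,
        show na + (l.count "A" + 1) = na + 1 + l.count "A" from by omega]
      ring
    · by_cases hB : i = "B"
      · have hc : (i :: l).count "A" = l.count "A" := by simp [hB]
        have hc2 : (i :: l).count "B" = l.count "B" + 1 := by simp [hB]
        have hc3 : countOther (i :: l) = countOther l := by simp [countOther, hB]
        rw [if_neg hA, if_pos hB, ih, hc, hc2, hc3,
          show nb + (l.count "B" + 1) = nb + 1 + l.count "B" from by omega]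
        ring
      · have hc : (i :: l).count "A" = l.count "A" := by simp [hA]
        have hc2 : (i :: l).count "B" = l.count "B" := by simp [hB]
        have hc3 : countOther (i :: l) = countOther l + 1 := by
          simp [countOther, hA, hB]
        rw [if_neg hA, if_neg hB, ih, hc, hc2, hc3,
          show nc + (countOther l + 1) = nc + 1 + countOther l from by omega]
        ring

theorem length_split (l : List String) :
    l.length = l.count "A" + l.count "B" + countOther l := by
  induction l with
  | nil => simp [countOther]
  | cons i l ih =>
    by_cases hA : i = "A"
    · simp [countOther, hA] at *; omega
    · by_cases hB : i = "B"
      · simp [countOther, hB] at *; omega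
      · simp [countOther, hA, hB] at *; omega

-- ===== VERDICT (by name: the statement is the Claim_ definition above) =====
theorem bill_spec : Claim_equal_bill := by
  intro orders _
  unfold Spec_bill bill bill_alt
  have h0 : pN 0 = 2 := by decide
  have hS0 : S 0 = 0 := by decide
  have hlen : (orders.length : Int) - (orders.count "A" : Int) - (orders.count "B" : Int)
      = ((countOther orders : Nat) : Int) := by
    have := length_split orders; omega
  rw [show ((2 : Int), (2 : Int), (2 : Int), (0 : Int)) = (pN 0, pN 0, pN 0, 0) by rw [h0],
    bill_fold orders 0 0 0 0]
  simp only [PySem.List.count_eq, hlen, groupTotal_natCast, Nat.zero_add, hS0]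
  ring
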